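-- pv_equiv track=rewrite | github.com/gu-ni/FeatureSelection | coding_test.py | solution
-- ===== SOURCE A (Python) =====
-- def solution(A, S):
--     A = [a - S for a in A]
--     result = 0
--     prefix_sum = 0
--     MAX = 1000000000
--     d = {0: 1}
--     for n in A:
--         prefix_sum += n
--         if prefix_sum in d:
--             result += d[prefix_sum]
--             if result > MAX:
--                 return MAX
--             d[prefix_sum] += 1
--         else:
--             d[prefix_sum] = 1
--     return result
-- ===== SOURCE B (Python) =====
-- def solution(A, S):
--     # Sort-then-scan instead of a hashmap: sort all prefix sums of a-S and
--     # count equal adjacent runs; equal prefix sums become adjacent after sorting.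
--     ps = [0]
--     run = 0
--     for a in A:
--         run += a - S
--         ps.append(run)
--     ps.sort()
--     total = 0
--     run = 0
--     for i in range(1, len(ps)):
--         if ps[i] == ps[i - 1]:
--             run += 1
--             total += run
--         else:
--             run = 0
--     return min(total, 1000000000)
-- ===== Notes on version B (the rewrite author's own statement) =====
-- stated objective: alternative
-- what changed: B replaces A's hashmap-of-prefix-sum-counts single pass by a sort-based algorithm: it materialises the list of all prefix sums of a-S (seeded with 0), sorts it, and counts pairs by scanning adjacent equal runs (run-length triangular sums), returning min(total, 10^9) which equals A's early-exit-capped count since A's accumulator is monotone.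
import Mathlib
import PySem

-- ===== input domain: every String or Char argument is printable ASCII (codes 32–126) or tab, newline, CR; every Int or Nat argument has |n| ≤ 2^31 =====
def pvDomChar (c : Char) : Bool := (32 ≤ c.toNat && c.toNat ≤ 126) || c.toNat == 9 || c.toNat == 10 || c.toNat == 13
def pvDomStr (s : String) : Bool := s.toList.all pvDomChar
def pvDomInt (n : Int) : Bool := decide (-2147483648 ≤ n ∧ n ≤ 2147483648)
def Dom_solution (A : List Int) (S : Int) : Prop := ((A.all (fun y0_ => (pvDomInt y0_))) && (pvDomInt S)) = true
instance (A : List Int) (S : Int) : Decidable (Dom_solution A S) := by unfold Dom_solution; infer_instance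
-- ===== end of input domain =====

-- B replaces A's hashmap of running prefix-sum counts by sort-then-scan: it collects all
-- prefix sums of a-S (seeded with 0), sorts them, and counts adjacent equal runs; the
-- result is capped with min(·, 10^9), which equals A's early-exit cap (A is monotone).

-- ===== PORT A =====
-- the loop of A: carries result, prefix_sum and the dict; the early 'return MAX' kept as in the Python
def solutionLoopA : List Int → Int → Int → PySem.Dict Int Int → Int
  | [], result, _, _ => result
  | n :: rest, result, ps, d =>
    match d.get? (ps + n) with
    | some c =>
      if result + c > 1000000000 then 1000000000
      else solutionLoopA rest (result + c) (ps + n) (d.insert (ps + n) (c + 1))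
    | none => solutionLoopA rest result (ps + n) (d.insert (ps + n) 1)

def solution (A : List Int) (S : Int) : Int :=
  solutionLoopA (A.map (fun a => a - S)) 0 0 (PySem.Dict.ofList [(0, 1)])

-- ===== PORT B =====
-- the second loop of Source B: walk the sorted list comparing each element with its predecessor
def runScanB : Int → Int → Int → List Int → Int
  | _, _, total, [] => total
  | prev, run, total, x :: rest =>
    if x = prev then runScanB x (run + 1) (total + (run + 1)) rest
    else runScanB x 0 total rest

def solution_alt (A : List Int) (S : Int) : Int :=
  let st := A.foldl (fun (st : List Int × Int) a =>
    let r := st.2 + (a - S); (st.1 ++ [r], r)) ([0], 0)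
  let sortedPs := PySem.List.sorted st.1 (fun x => x) false
  let total := match sortedPs with
    | [] => 0
    | p :: tl => runScanB p 0 0 tl
  min total 1000000000

-- ===== PRECONDITION & SPEC =====
def Spec_solution (A : List Int) (S : Int) (out : Int) : Prop := out = solution_alt A S
instance (A : List Int) (S : Int) (out : Int) : Decidable (Spec_solution A S out) := by unfold Spec_solution; infer_instance

-- ===== CLAIM (what is proved, stated in full; the proofs are below) =====
def Claim_equal_solution : Prop := ∀ (A : List Int) (S : Int), Dom_solution A S → Spec_solution A S (solution A S)

-- ===== LEMMAS AND PROOFS =====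

-- the successive prefix sums starting from ps
def pvPrefs : Int → List Int → List Int
  | _, [] => []
  | ps, n :: rest => (ps + n) :: pvPrefs (ps + n) rest

-- uncapped pair count performed by A's loop (proof-side only)
def pvPairs : List Int → Int → PySem.Dict Int Int → Int
  | [], _, _ => 0
  | n :: rest, ps, d =>
    match d.get? (ps + n) with
    | some c => c + pvPairs rest (ps + n) (d.insert (ps + n) (c + 1))
    | none => pvPairs rest (ps + n) (d.insert (ps + n) 1)

-- "each element adds the number of equal elements already seen"
def pvCnt : List Int → List Int → Int
  | _, [] => 0
  | seen, x :: rest => (seen.count x : Int) + pvCnt (x :: seen) rest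

-- equal-pair count of a list, counting each later equal partner
def pvPairsOf : List Int → Int
  | [] => 0
  | x :: rest => (rest.count x : Int) + pvPairsOf rest

def pvInv (seen : List Int) (d : PySem.Dict Int Int) : Prop :=
  ∀ v : Int, d.get? v = if seen.count v = 0 then none else some (seen.count v : Int)

def pvPos (d : PySem.Dict Int Int) : Prop := ∀ v ∈ d.values, 1 ≤ v

lemma pvPos_insert {d : PySem.Dict Int Int} {k v : Int} (hd : pvPos d) (hv : 1 ≤ v) :
    pvPos (d.insert k v) := by
  intro w hw
  rcases PySem.Dict.mem_values_insert _ _ _ _ hw with h | h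
  · omega
  · exact hd w h

lemma pvMem_values_of_get? {d : PySem.Dict Int Int} {k c : Int} (h : d.get? k = some c) :
    c ∈ d.values := by
  have := PySem.Dict.mem_items_of_get?_eq_some _ h
  simp only [PySem.Dict.values]
  exact List.mem_map.mpr ⟨(k, c), this, rfl⟩

lemma pvPairs_nonneg (xs : List Int) (ps : Int) (d : PySem.Dict Int Int) (hd : pvPos d) :
    0 ≤ pvPairs xs ps d := by
  induction xs generalizing ps d with
  | nil => simp [pvPairs]
  | cons n rest ih =>
    cases h : d.get? (ps + n) with
    | some c =>
      have hc : 1 ≤ c := hd c (pvMem_values_of_get? h)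
      have := ih (ps + n) (d.insert (ps + n) (c + 1)) (pvPos_insert hd (by omega))
      simp only [pvPairs, h]
      omega
    | none =>
      have := ih (ps + n) (d.insert (ps + n) 1) (pvPos_insert hd (by omega))
      simp only [pvPairs, h]
      omega

-- A's loop equals the uncapped count clipped at the cap
lemma pvLoopA_eq_min (xs : List Int) (r ps : Int) (d : PySem.Dict Int Int)
    (hd : pvPos d) (hr : r ≤ 1000000000) :
    solutionLoopA xs r ps d = min (r + pvPairs xs ps d) 1000000000 := by
  induction xs generalizing r ps d with
  | nil => simp [solutionLoopA, pvPairs]; omega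
  | cons n rest ih =>
    cases h : d.get? (ps + n) with
    | some c =>
      have hc : 1 ≤ c := hd c (pvMem_values_of_get? h)
      have hd' : pvPos (d.insert (ps + n) (c + 1)) := pvPos_insert hd (by omega)
      simp only [solutionLoopA, pvPairs, h]
      by_cases hcap : r + c > 1000000000
      · simp only [if_pos hcap]
        have := pvPairs_nonneg rest (ps + n) (d.insert (ps + n) (c + 1)) hd'
        omega
      · simp only [if_neg hcap]
        rw [ih (r + c) (ps + n) _ hd' (by omega)]
        omega
    | none =>
      simp only [solutionLoopA, pvPairs, h]
      exact ih r (ps + n) (d.insert (ps + n) 1) (pvPos_insert hd (by omega)) hr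

lemma pvInv_insert {seen : List Int} {d : PySem.Dict Int Int} (hI : pvInv seen d) (x : Int) :
    pvInv (x :: seen) (d.insert x ((seen.count x : Int) + 1)) := by
  intro v
  rw [PySem.Dict.get?_insert]
  by_cases hv : v = x
  · subst hv
    simp [List.count_cons]
  · have hv2 : ¬ (x = v) := fun h => hv h.symm
    have : (x :: seen).count v = seen.count v := by
      simp [List.count_cons, hv2]
    simp [hv, this, hI v]

-- the dict-driven count of A equals the seen-list count over the prefix sums
lemma pvPairs_eq_cnt (xs : List Int) (ps : Int) (seen : List Int) (d : PySem.Dict Int Int)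
    (hI : pvInv seen d) :
    pvPairs xs ps d = pvCnt seen (pvPrefs ps xs) := by
  induction xs generalizing ps seen d with
  | nil => simp [pvPairs, pvPrefs, pvCnt]
  | cons n rest ih =>
    have hget := hI (ps + n)
    by_cases hz : seen.count (ps + n) = 0
    · rw [if_pos hz] at hget
      have h1 : ((seen.count (ps + n) : Int) + 1) = 1 := by rw [hz]; rfl
      have hins := pvInv_insert hI (ps + n)
      rw [h1] at hins
      simp only [pvPairs, hget, pvPrefs, pvCnt, hz]
      rw [ih (ps + n) _ _ hins]
      simp
    · rw [if_neg hz] at hget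
      have hins := pvInv_insert hI (ps + n)
      simp only [pvPairs, hget, pvPrefs, pvCnt]
      rw [ih (ps + n) _ _ hins]
  termination_by xs.length
  decreasing_by all_goals simp

lemma pvSumCount_cons (x : Int) (seen rest : List Int) :
    (rest.map (fun y => ((x :: seen).count y : Int))).sum
      = (rest.map (fun y => (seen.count y : Int))).sum + (rest.count x : Int) := by
  induction rest with
  | nil => simp
  | cons y t iht =>
    simp only [List.map_cons, List.sum_cons, iht]
    by_cases hxy : y = x
    · subst hxy
      simp [List.count_cons]
      ring
    · have h1 : ¬ ((y : Int) == x) = true := by simp [hxy]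
      have h2 : ¬ (x = y) := fun h => hxy h.symm
      simp [List.count_cons, h1, h2]
      ring

-- decomposition of pvCnt: pairs inside l plus matches against the seen list
lemma pvCnt_eq (seen l : List Int) :
    pvCnt seen l = pvPairsOf l + (l.map (fun x => (seen.count x : Int))).sum := by
  induction l generalizing seen with
  | nil => simp [pvCnt, pvPairsOf]
  | cons x rest ih =>
    simp only [pvCnt, pvPairsOf, List.map_cons, List.sum_cons]
    rw [ih (x :: seen), pvSumCount_cons]
    ring

lemma pvPairsOf_perm {l l' : List Int} (h : l.Perm l') : pvPairsOf l = pvPairsOf l' := by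
  induction h with
  | nil => rfl
  | cons x h ih => simp [pvPairsOf, ih, h.count_eq]
  | swap x y l =>
    simp only [pvPairsOf, List.count_cons]
    by_cases hxy : y = x
    · subst hxy; ring
    · have h2 : ¬ (x = y) := fun h => hxy h.symm
      simp [hxy, h2]
      ring
  | trans _ _ ih1 ih2 => rw [ih1, ih2]

-- the run scan over a sorted tail computes pvCnt against any seen list of ≤-elements
lemma pvRunScan_eq (l : List Int) (prev run total : Int) (seen : List Int)
    (hsorted : (prev :: l).Pairwise (· ≤ ·))
    (hcount : (seen.count prev : Int) = run + 1)
    (hle : ∀ y ∈ seen, y ≤ prev) :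
    runScanB prev run total l = total + pvCnt seen l := by
  induction l generalizing prev run total seen with
  | nil => simp [runScanB, pvCnt]
  | cons x rest ih =>
    have hpx : prev ≤ x := (List.pairwise_cons.mp hsorted).1 x (by simp)
    have hsorted' : (x :: rest).Pairwise (· ≤ ·) := (List.pairwise_cons.mp hsorted).2
    by_cases hx : x = prev
    · subst hx
      have hcnt' : (((x :: seen).count x : Int)) = (run + 1) + 1 := by
        rw [List.count_cons_self]; omega
      have hle' : ∀ y ∈ x :: seen, y ≤ x := by
        intro y hy
        rcases List.mem_cons.mp hy with h | h
        · exact le_of_eq h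
        · exact hle y h
      simp only [runScanB, if_true, pvCnt]
      rw [ih x (run + 1) (total + (run + 1)) (x :: seen) hsorted' hcnt' hle', hcount]
      ring
    · have hlt : prev < x := lt_of_le_of_ne hpx (fun h => hx h.symm)
      have hzero : seen.count x = 0 := by
        rw [List.count_eq_zero]
        intro hmem
        exact absurd (hle x hmem) (not_le.mpr hlt)
      have hcnt' : (((x :: seen).count x : Int)) = 0 + 1 := by
        rw [List.count_cons_self, hzero]; rfl
      have hle' : ∀ y ∈ x :: seen, y ≤ x := by
        intro y hy
        rcases List.mem_cons.mp hy with h | h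
        · exact le_of_eq h
        · exact le_of_lt (lt_of_le_of_lt (hle y h) hlt)
      simp only [runScanB, if_neg hx, pvCnt, hzero]
      rw [ih x 0 total (x :: seen) hsorted' hcnt' hle']
      simp

-- Source B's first loop builds 0 :: (prefix sums)
lemma pvBuild_eq (xs : List Int) (acc : List Int) (r : Int) :
    (xs.foldl (fun (st : List Int × Int) a => ((st.1 ++ [st.2 + a], st.2 + a) : List Int × Int)) (acc, r))
      = (acc ++ pvPrefs r xs, r + xs.sum) := by
  induction xs generalizing acc r with
  | nil => simp [pvPrefs]
  | cons n rest ih =>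
    simp only [List.foldl_cons, pvPrefs]
    rw [ih]
    simp
    ring

lemma pvCnt_nil_cons (x : Int) (l : List Int) : pvCnt [] (x :: l) = pvCnt [x] l := by
  simp [pvCnt]

-- ===== VERDICT (by name: the statement is the Claim_ definition above) =====
theorem solution_spec : Claim_equal_solution := by
  intro A S _
  unfold Spec_solution solution solution_alt
  dsimp only
  set xs := A.map (fun a => a - S) with hxs
  -- A side
  have hd0 : pvPos (PySem.Dict.ofList [((0:Int), (1:Int))]) := by
    intro v hv
    have hvals : (PySem.Dict.ofList [((0:Int), (1:Int))]).values = [1] := by decide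
    rw [hvals] at hv
    simp at hv
    omega
  have hI0 : pvInv [0] (PySem.Dict.ofList [((0:Int), (1:Int))]) := by
    intro v
    by_cases hv : v = 0
    · subst hv; decide
    · have hv' : ¬ ((0:Int) = v) := fun h => hv h.symm
      have h1 : ([(0:Int)].count v) = 0 := by
        simp [hv']
      have h2 : (PySem.Dict.ofList [((0:Int), (1:Int))]).get? v = none := by
        rw [show PySem.Dict.ofList [((0:Int), (1:Int))] = (PySem.Dict.empty).insert 0 1 from rfl,
          PySem.Dict.get?_insert]
        simp [hv, PySem.Dict.get?_empty]
      rw [h2, if_pos h1]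
  rw [pvLoopA_eq_min xs 0 0 _ hd0 (by norm_num), pvPairs_eq_cnt xs 0 [0] _ hI0]
  -- B side: the built list is 0 :: prefixes
  have hbuild : (A.foldl (fun (st : List Int × Int) a =>
      ((st.1 ++ [st.2 + (a - S)], st.2 + (a - S)) : List Int × Int)) ([0], 0)).1
      = 0 :: pvPrefs 0 xs := by
    have := pvBuild_eq xs [0] 0
    rw [hxs, List.foldl_map] at this
    exact congrArg Prod.fst this
  rw [hbuild]
  -- the scan over the sorted list equals pvCnt [] of the sorted list
  have hperm : (PySem.List.sorted (0 :: pvPrefs 0 xs) (fun x => x) false).Perm (0 :: pvPrefs 0 xs) :=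
    PySem.List.sorted_perm _ _ _
  have hpw : (PySem.List.sorted (0 :: pvPrefs 0 xs) (fun x => x) false).Pairwise (· ≤ ·) := by
    have := PySem.List.sorted_pairwise (0 :: pvPrefs 0 xs) (fun x => x)
    simpa using this
  have hne : PySem.List.sorted (0 :: pvPrefs 0 xs) (fun x => x) false ≠ [] := by
    intro h
    have := hperm.length_eq
    rw [h] at this
    simp at this
  cases hs : PySem.List.sorted (0 :: pvPrefs 0 xs) (fun x => x) false with
  | nil => exact absurd hs hne
  | cons p tl =>
    rw [hs] at hperm hpw
    have hscan : runScanB p 0 0 tl = 0 + pvCnt [p] tl := by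
      apply pvRunScan_eq tl p 0 0 [p] hpw
      · simp
      · intro y hy; simp at hy; omega
    show min (0 + pvCnt [0] (pvPrefs 0 xs)) 1000000000 = min (runScanB p 0 0 tl) 1000000000
    rw [hscan, zero_add, zero_add]
    -- permutation invariance transfers the sorted count back to the original list
    have h1 : pvCnt [p] tl = pvPairsOf (p :: tl) := by
      rw [← pvCnt_nil_cons, pvCnt_eq]; simp
    have h2 : pvCnt [0] (pvPrefs 0 xs) = pvPairsOf (0 :: pvPrefs 0 xs) := by
      rw [← pvCnt_nil_cons, pvCnt_eq]; simp
    rw [h1, h2, pvPairsOf_perm hperm]
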